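-- pv_equiv track=rewrite | github.com/makinatetanos/checker-crypto | src/verificador_monero/utils.py | validate_monero_address
-- ===== SOURCE A (Python) =====
-- from typing import Optional, Callable, Any
--
-- def validate_monero_address(address: Optional[str]) -> bool:
--     """
--     Valida si una dirección de Monero tiene el formato correcto.
--
--     Args:
--         address (Optional[str]): Dirección a validar.
--
--     Returns:
--         bool: True si la dirección es válida.
--     """
--     """
--     Valida una dirección de Monero.
--
--     Args:
--         address: La dirección a validar.
--
--     Returns:
--         bool: True si la dirección es válida.
--     """
--     if not isinstance(address, str):
--         return False
--
--     # Verificar longitud básica (95 caracteres para direcciones estándar)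
--     if len(address) != 95:
--         return False
--
--     # Verificar que comienza con '4'
--     if not address.startswith('4'):
--         return False
--
--     # Verificar caracteres válidos (base58)
--     valid_chars = set("123456789ABCDEFGHJKLMNPQRSTUVWXYZabcdefghijkmnopqrstuvwxyz")
--     return all(c in valid_chars for c in address)
-- ===== SOURCE B (Python) =====
-- import re
--
-- _MONERO_RE = re.compile(r"4[123456789ABCDEFGHJKLMNPQRSTUVWXYZabcdefghijkmnopqrstuvwxyz]{94}")
--
-- def validate_monero_address(address):
--     if not isinstance(address, str):
--         return False
--     return bool(_MONERO_RE.fullmatch(address))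
-- ===== Notes on version B (the rewrite author's own statement) =====
-- stated objective: idiomatic
-- what changed: Replaced the separate length/prefix/charset passes over the string by a single precompiled regular-expression fullmatch encoding the required prefix and exactly 94 base58 characters.
import Mathlib
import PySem

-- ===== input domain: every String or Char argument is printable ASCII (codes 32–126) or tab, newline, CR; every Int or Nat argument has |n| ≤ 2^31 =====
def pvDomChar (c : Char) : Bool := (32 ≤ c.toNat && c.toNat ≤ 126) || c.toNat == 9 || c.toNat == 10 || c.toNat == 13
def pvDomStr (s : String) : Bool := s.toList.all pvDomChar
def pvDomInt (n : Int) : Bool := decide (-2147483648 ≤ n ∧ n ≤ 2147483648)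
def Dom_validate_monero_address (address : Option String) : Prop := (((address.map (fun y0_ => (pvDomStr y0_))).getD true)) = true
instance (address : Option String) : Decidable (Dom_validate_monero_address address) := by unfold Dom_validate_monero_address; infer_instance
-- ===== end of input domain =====

-- B replaces A's separate length / prefix / charset checks by a single regular-expression
-- fullmatch of the fixed pattern 4[base58]{94} (idiomatic, same cost).


-- ===== PORT A =====
def validChars : PySem.Set Char :=
  PySem.Set.ofList "123456789ABCDEFGHJKLMNPQRSTUVWXYZabcdefghijkmnopqrstuvwxyz".toList

def validate_monero_address (address : Option String) : Bool :=
  match address with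
  | none => false
  | some a =>
    if PySem.Str.len a ≠ 95 then false
    else if ¬ PySem.Str.startswith a "4" then false
    else a.toList.all (fun c => PySem.Set.contains validChars c)

-- ===== PORT B =====
-- hand port of re.fullmatch(r"4[base58]{94}", a): exact for this fixed pattern
def b58Class : List Char :=
  "123456789ABCDEFGHJKLMNPQRSTUVWXYZabcdefghijkmnopqrstuvwxyz".toList

def moneroFullmatch : List Char → Bool
  | '4' :: rest => rest.length == 94 && rest.all (fun c => b58Class.contains c)
  | _ => false

def validate_monero_address_alt (address : Option String) : Bool :=
  match address with
  | none => false
  | some a => moneroFullmatch a.toList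

-- ===== PRECONDITION & SPEC =====
def Spec_validate_monero_address (address : Option String) (out : Bool) : Prop := out = validate_monero_address_alt address
instance (address : Option String) (out : Bool) : Decidable (Spec_validate_monero_address address out) := by unfold Spec_validate_monero_address; infer_instance

-- ===== CLAIM (what is proved, stated in full; the proofs are below) =====
def Claim_equal_validate_monero_address : Prop := ∀ (address : Option String), Dom_validate_monero_address address → Spec_validate_monero_address address (validate_monero_address address)

-- ===== LEMMAS AND PROOFS =====

-- ===== VERDICT (by name: the statement is the Claim_ definition above) =====
lemma contains_validChars (c : Char) :
    PySem.Set.contains validChars c = b58Class.contains c := by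
  simp [validChars, b58Class, PySem.Set.contains_eq_listContains]

lemma main_list (l : List Char) :
    (if (PySem.Chars.len l : Int) ≠ 95 then false
     else if ¬ PySem.Chars.startswith l ['4'] then false
     else l.all (fun c => PySem.Set.contains validChars c)) = moneroFullmatch l := by
  cases l with
  | nil => simp [PySem.Chars.len, moneroFullmatch]
  | cons c rest =>
    simp only [PySem.Chars.len, PySem.Chars.startswith, List.length_cons, List.all_cons,
      contains_validChars]
    have hcast : (((rest.length + 1 : Nat) : Int) ≠ 95) ↔ rest.length ≠ 94 := by omega
    simp only [hcast]
    by_cases h4 : c = '4'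
    · subst h4
      by_cases hlen : rest.length = 94
      · simp [moneroFullmatch, hlen, List.isPrefixOf, b58Class]
      · simp [moneroFullmatch, hlen]
    · have hm : moneroFullmatch (c :: rest) = false := by
        unfold moneroFullmatch
        split
        · rename_i heq; cases heq; exact absurd rfl h4
        · rfl
      rw [hm]
      have hp : ['4'].isPrefixOf (c :: rest) = false := by
        simp [List.isPrefixOf]
        intro h; exact absurd h.symm h4
      simp [hp]

theorem validate_monero_address_spec : Claim_equal_validate_monero_address := by
  intro address _
  unfold Spec_validate_monero_address validate_monero_address validate_monero_address_alt
  cases address with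
  | none => rfl
  | some a =>
    have : "4".toList = ['4'] := rfl
    simp only [PySem.Str.len, PySem.Str.startswith, this]
    exact main_list a.toList
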